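-- pv_equiv track=rewrite | github.com/fischermoseley/manta | manta.py | make_widths
-- ===== SOURCE A (Python) =====
-- def make_widths(config):
--     # {probe0, probe1, probe2}
--     # [12, 1, 3] should produce
--     # [ (15, 4) (3, 3) (2,0) ]
--
--     widths = list(config["downlink"]["probes"].values())
--
--     # easiest to make by summing them and incrementally subtracting
--     s = sum(widths)
--     slices = []
--     for width in widths:
--         slices.append((s - 1, s - width))
--         s = s - width
--
--     assert s == 0, "Probe sizes are weird, cannot slice bits properly"
--     return slices
-- ===== SOURCE B (Python) =====
-- def make_widths(config):
--     # B: build the slices back-to-front: walk the widths in REVERSE, growing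
--     # a running bottom offset upward from 0 (last probe owns bits 0..w-1),
--     # then reverse the collected list. No sum() and no running decrement.
--     widths = list(config["downlink"]["probes"].values())
--     out = []
--     bottom = 0
--     for w in reversed(widths):
--         out.append((bottom + w - 1, bottom))
--         bottom += w
--     out.reverse()
--     return out
-- ===== Notes on version B (the rewrite author's own statement) =====
-- stated objective: alternative
-- what changed: Replaces A's top-down running-total decrement (s = sum(widths) shrinking per probe) with a back-to-front construction: walk the widths reversed with a bottom offset growing upward from 0, then reverse the output; Pre_ only excludes inputs missing the 'downlink'/'probes' keys, where A raises KeyError.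
import Mathlib
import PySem

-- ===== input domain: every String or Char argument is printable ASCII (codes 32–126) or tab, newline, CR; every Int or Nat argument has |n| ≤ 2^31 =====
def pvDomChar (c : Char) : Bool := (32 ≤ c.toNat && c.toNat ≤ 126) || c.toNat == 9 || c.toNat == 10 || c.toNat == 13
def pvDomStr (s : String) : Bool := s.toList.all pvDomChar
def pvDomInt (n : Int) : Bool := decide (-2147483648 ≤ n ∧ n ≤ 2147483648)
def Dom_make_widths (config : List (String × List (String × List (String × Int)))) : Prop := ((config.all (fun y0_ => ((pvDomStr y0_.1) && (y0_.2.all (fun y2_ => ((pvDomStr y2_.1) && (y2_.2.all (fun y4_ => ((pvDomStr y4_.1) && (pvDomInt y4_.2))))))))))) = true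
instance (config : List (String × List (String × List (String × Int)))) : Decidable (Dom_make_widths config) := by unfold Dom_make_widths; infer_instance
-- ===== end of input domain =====

-- B builds the slices back-to-front (reversed widths, bottom offset growing from 0, then reverse) instead of A's top-down running-total decrement; same O(n) cost (objective: alternative).


-- ===== PORT A =====
-- the 'for width in widths' loop: state = (s, slices), appending each slice
def pvALoop (widths : List Int) (s : Int) (slices : List (Int × Int)) : List (Int × Int) :=
  match widths with
  | [] => slices
  | w :: ws => pvALoop ws (s - w) (slices ++ [(s - 1, s - w)])

def make_widths (config : List (String × List (String × List (String × Int)))) : List (Int × Int) :=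
  match (PySem.Dict.ofList config).get? "downlink" with
  | none => []  -- KeyError: excluded by Pre_make_widths
  | some dl =>
    match (PySem.Dict.ofList dl).get? "probes" with
    | none => []  -- KeyError: excluded by Pre_make_widths
    | some probes =>
      let widths := (PySem.Dict.ofList probes).values
      let s := widths.sum
      pvALoop widths s []
      -- the final 'assert s == 0' always passes: s ends at sum - sum = 0

-- ===== PORT B =====
def make_widths_alt (config : List (String × List (String × List (String × Int)))) : List (Int × Int) :=
  match (PySem.Dict.ofList config).get? "downlink" with
  | none => []  -- KeyError: excluded by Pre_make_widths
  | some dl =>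
    match (PySem.Dict.ofList dl).get? "probes" with
    | none => []  -- KeyError: excluded by Pre_make_widths
    | some probes =>
      let widths := (PySem.Dict.ofList probes).values
      -- 'for w in reversed(widths)' with state (bottom, out), appending; then out.reverse()
      let st := widths.reverse.foldl
        (fun (acc : Int × List (Int × Int)) w => (acc.1 + w, acc.2 ++ [(acc.1 + w - 1, acc.1)]))
        (0, [])
      st.2.reverse

-- ===== PRECONDITION & SPEC =====
-- Pre_ excludes exactly the inputs where A raises KeyError: no "downlink" key, or no "probes" key inside it.
def Pre_make_widths (config : List (String × List (String × List (String × Int)))) : Prop :=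
  (((PySem.Dict.ofList config).get? "downlink").bind
      (fun dl => ((PySem.Dict.ofList dl).get? "probes"))).isSome = true
instance (config : List (String × List (String × List (String × Int)))) : Decidable (Pre_make_widths config) := by unfold Pre_make_widths; infer_instance

def pvWitness_make_widths : (List (String × List (String × List (String × Int)))) :=
  [("downlink", [("probes", [("probe0", 12), ("probe1", 1), ("probe2", 3)])])]

def Spec_make_widths (config : List (String × List (String × List (String × Int)))) (out : List (Int × Int)) : Prop := out = make_widths_alt config
instance (config : List (String × List (String × List (String × Int)))) (out : List (Int × Int)) : Decidable (Spec_make_widths config out) := by unfold Spec_make_widths; infer_instance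

-- ===== CLAIM (what is proved, stated in full; the proofs are below) =====
def Claim_equal_make_widths : Prop := ∀ (config : List (String × List (String × List (String × Int)))), Dom_make_widths config → Pre_make_widths config → Spec_make_widths config (make_widths config)

-- ===== LEMMAS AND PROOFS =====

-- characterisation of A's loop result: the slice list as a cons recursion on the widths
def pvSlices (s : Int) (widths : List Int) : List (Int × Int) :=
  match widths with
  | [] => []
  | w :: ws => (s - 1, s - w) :: pvSlices (s - w) ws

theorem pvALoop_eq (ws : List Int) : ∀ (s : Int) (sl : List (Int × Int)),
    pvALoop ws s sl = sl ++ pvSlices s ws := by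
  induction ws with
  | nil => intro s sl; simp [pvALoop, pvSlices]
  | cons w ws ih => intro s sl; simp [pvALoop, pvSlices, ih, List.append_assoc]

-- B's upward list, as a cons recursion
def pvUp (b : Int) (widths : List Int) : List (Int × Int) :=
  match widths with
  | [] => []
  | w :: ws => (b + w - 1, b) :: pvUp (b + w) ws

theorem pvBFold_eq (ws : List Int) : ∀ (b : Int) (acc : List (Int × Int)),
    (ws.foldl (fun (a : Int × List (Int × Int)) w => (a.1 + w, a.2 ++ [(a.1 + w - 1, a.1)]))
      (b, acc)).2 = acc ++ pvUp b ws := by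
  induction ws with
  | nil => intro b acc; simp [pvUp]
  | cons w ws ih => intro b acc; simp [List.foldl, pvUp, ih, List.append_assoc]

theorem pvUp_snoc (l : List Int) : ∀ (b w : Int),
    pvUp b (l ++ [w]) = pvUp b l ++ [(b + l.sum + w - 1, b + l.sum)] := by
  induction l with
  | nil => intro b w; simp [pvUp]
  | cons x xs ih =>
    intro b w
    simp only [List.cons_append, pvUp, ih, List.sum_cons]
    have e : b + x + xs.sum = b + (x + xs.sum) := by ring
    rw [e]

theorem pvUp_rev (ws : List Int) : ∀ (b : Int),
    (pvUp b ws.reverse).reverse = pvSlices (b + ws.sum) ws := by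
  induction ws with
  | nil => intro b; simp [pvUp, pvSlices]
  | cons w ws ih =>
    intro b
    rw [List.reverse_cons, pvUp_snoc, List.reverse_append, List.reverse_singleton]
    simp only [List.singleton_append, pvSlices, List.sum_cons, ih, List.sum_reverse]
    have e : b + (w + ws.sum) - w = b + ws.sum := by ring
    rw [e]
    congr 1
    rw [Prod.mk.injEq]
    constructor <;> ring

-- ===== VERDICT (by name: the statement is the Claim_ definition above) =====
theorem make_widths_spec : Claim_equal_make_widths := by
  intro config _ _
  unfold Spec_make_widths make_widths make_widths_alt
  cases h1 : (PySem.Dict.ofList config).get? "downlink" with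
  | none => simp
  | some dl =>
    cases h2 : (PySem.Dict.ofList dl).get? "probes" with
    | none => simp only [h2]
    | some probes =>
      simp only [h2]
      rw [pvALoop_eq, pvBFold_eq]
      simp only [List.nil_append]
      rw [pvUp_rev]
      simp
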